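-- pv_equiv track=rewrite | github.com/Clube-do-Enrolado/Compiladores | Lexical/afds.py | afd_delimiters
-- ===== SOURCE A (Python) =====
-- def afd_delimiters(lexem):
--     # delimiters = [",",":","(",")","\n","\t"]
--
--     transition_table = {
--             0: {',': 1,':': 1, '(':1, ')':1, '\n':1, '\t':1},
--             1: {}
--             }
--
--     current_state = 0
--     ESTADOS_FINAIS = [1]
--
--     for char in lexem:
--         # Se o caractere lido não for válido entre as opções dadas
--         if char not in transition_table[current_state].keys():
--             # O lexema não é válido.
--             return (False,None)
--
--         else: # Muda de estado.
--             current_state = transition_table[current_state][char]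
--
--     # Está no estado final e não existem mais caracteres para leitura.
--     if current_state in ESTADOS_FINAIS:
--         return (True,lexem)
--     else:
--         return (False,None)
-- ===== SOURCE B (Python) =====
-- DELIMITERS = {",", ":", "(", ")", "\n", "\t"}
--
-- def afd_delimiters(lexem):
--     if len(lexem) == 1 and lexem in DELIMITERS:
--         return (True, lexem)
--     return (False, None)
-- ===== Notes on version B (the rewrite author's own statement) =====
-- stated objective: simpler
-- what changed: Replaced the character-by-character DFA simulation (transition table + state loop) with a closed-form check: length == 1 and membership in the delimiter set.
import Mathlib
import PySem

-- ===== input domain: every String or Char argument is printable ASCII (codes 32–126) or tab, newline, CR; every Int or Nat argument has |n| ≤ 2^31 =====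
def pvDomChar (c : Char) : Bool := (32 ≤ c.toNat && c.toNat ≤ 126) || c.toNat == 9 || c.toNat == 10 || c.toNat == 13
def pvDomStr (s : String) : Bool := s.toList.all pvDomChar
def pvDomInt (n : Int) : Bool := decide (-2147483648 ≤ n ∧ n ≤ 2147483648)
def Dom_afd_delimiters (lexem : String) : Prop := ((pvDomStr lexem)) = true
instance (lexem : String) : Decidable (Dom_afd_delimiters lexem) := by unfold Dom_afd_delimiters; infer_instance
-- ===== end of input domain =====

-- B replaces A's DFA simulation over the string with a closed-form length-1 + membership test (objective: simpler).

-- ===== PORT A =====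
-- transition from state 0: delimiter chars go to state 1; state 1 has no transitions
def afdDelta (state : Int) (c : Char) : Option Int :=
  if state = 0 then
    if c = ',' ∨ c = ':' ∨ c = '(' ∨ c = ')' ∨ c = '\n' ∨ c = '\t' then some 1 else none
  else none

-- the for-loop: early return (False, None) on invalid char, else advance the state
def afdLoop (lexem : String) (chars : List Char) (state : Int) : Bool × Option String :=
  match chars with
  | [] => if state = 1 then (true, some lexem) else (false, none)
  | c :: rest =>
    match afdDelta state c with
    | none => (false, none)
    | some s' => afdLoop lexem rest s'

def afd_delimiters (lexem : String) : Bool × Option String :=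
  afdLoop lexem lexem.toList 0

-- ===== PORT B =====
def afdDelimSet : List Char := [',', ':', '(', ')', '\n', '\t']

def afd_delimiters_alt (lexem : String) : Bool × Option String :=
  if lexem.toList.length = 1 ∧ lexem.toList ∈ afdDelimSet.map (fun c => [c]) then
    (true, some lexem)
  else (false, none)

-- ===== PRECONDITION & SPEC =====
def Spec_afd_delimiters (lexem : String) (out : Bool × Option String) : Prop := out = afd_delimiters_alt lexem
instance (lexem : String) (out : Bool × Option String) : Decidable (Spec_afd_delimiters lexem out) := by unfold Spec_afd_delimiters; infer_instance

-- ===== CLAIM (what is proved, stated in full; the proofs are below) =====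
def Claim_equal_afd_delimiters : Prop := ∀ (lexem : String), Dom_afd_delimiters lexem → Spec_afd_delimiters lexem (afd_delimiters lexem)

-- ===== LEMMAS AND PROOFS =====
theorem afd_delimiters_eq_alt (lexem : String) :
    afd_delimiters lexem = afd_delimiters_alt lexem := by
  unfold afd_delimiters afd_delimiters_alt
  match h : lexem.toList with
  | [] => simp [afdLoop, afdDelimSet]
  | [c] =>
    by_cases hc : c = ',' ∨ c = ':' ∨ c = '(' ∨ c = ')' ∨ c = '\n' ∨ c = '\t'
    · rcases hc with h1 | h1 | h1 | h1 | h1 | h1 <;> subst h1 <;>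
        simp [afdLoop, afdDelta, afdDelimSet]
    · push_neg at hc
      obtain ⟨h1, h2, h3, h4, h5, h6⟩ := hc
      simp [afdLoop, afdDelta, afdDelimSet, h1, h2, h3, h4, h5, h6]
  | c :: d :: rest =>
    by_cases hc : c = ',' ∨ c = ':' ∨ c = '(' ∨ c = ')' ∨ c = '\n' ∨ c = '\t'
    · -- first step goes to state 1, second char always fails
      simp [afdLoop, afdDelta, afdDelimSet, hc]
    · push_neg at hc
      obtain ⟨h1, h2, h3, h4, h5, h6⟩ := hc
      simp [afdLoop, afdDelta, afdDelimSet, h1, h2, h3, h4, h5, h6]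

-- ===== VERDICT (by name: the statement is the Claim_ definition above) =====
theorem afd_delimiters_spec : Claim_equal_afd_delimiters := by
  intro lexem _
  unfold Spec_afd_delimiters
  exact afd_delimiters_eq_alt lexem
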